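-- pv_equiv track=rewrite | github.com/Szymon-Budziak/Algorithms_and_Data_Structures_course_AGH | Dynamic Programming/28_Santa_Claus_and_candies.py | santa_claus_and_candies
-- ===== SOURCE A (Python) =====
-- def santa_claus_and_candies(n):
--     result = []
--     i = 1
--     while n > 0:
--         if n - i >= 0:
--             result.append(i)
--             n -= i
--             i += 1
--         else:
--             result[-1] += n
--             break
--     return len(result), result
-- ===== SOURCE B (Python) =====
-- def santa_claus_and_candies(n):
--     if n <= 0:
--         return 0, []
--     # binary search for the largest k with k*(k+1)//2 <= n
--     lo, hi = 0, n + 1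
--     while hi - lo > 1:
--         mid = (lo + hi) // 2
--         if mid * (mid + 1) // 2 <= n:
--             lo = mid
--         else:
--             hi = mid
--     k = lo
--     result = list(range(1, k + 1))
--     rem = n - k * (k + 1) // 2
--     if rem > 0:
--         result[-1] += rem
--     return len(result), result
-- ===== Notes on version B (the rewrite author's own statement) =====
-- stated objective: alternative
-- what changed: Replaces the subtract-and-append loop by a binary search for the largest k with k*(k+1)/2 <= n, then materializes list(range(1,k+1)) in one shot and adds the remainder to the last element.
import Mathlib
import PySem

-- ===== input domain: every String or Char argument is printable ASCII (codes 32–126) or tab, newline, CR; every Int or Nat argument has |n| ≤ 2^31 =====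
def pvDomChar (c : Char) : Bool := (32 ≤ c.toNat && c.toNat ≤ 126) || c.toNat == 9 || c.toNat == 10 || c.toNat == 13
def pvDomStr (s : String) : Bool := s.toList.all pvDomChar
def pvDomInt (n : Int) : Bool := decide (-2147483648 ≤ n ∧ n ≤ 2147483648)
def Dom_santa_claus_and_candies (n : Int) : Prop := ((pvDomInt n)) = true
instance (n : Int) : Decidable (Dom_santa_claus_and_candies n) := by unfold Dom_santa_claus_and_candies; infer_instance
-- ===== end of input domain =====

-- B replaces A's subtract-and-append loop by a binary search for the largest k with
-- k*(k+1)//2 <= n plus a one-shot range build (alternative algorithm, similar cost).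

-- ===== PORT A =====
-- result[-1] += v on a nonempty list (the [] case is unreachable in A: Python raises IndexError there)
def pvAddLast (xs : List Int) (v : Int) : List Int :=
  match xs with
  | [] => []
  | _ => xs.dropLast ++ [xs.getLastD 0 + v]

-- while n > 0: … ; fuel = n.toNat + 1 bounds the iteration count (each pass subtracts i ≥ 1)
def santaLoopA : Nat → Int → Int → List Int → Int × List Int
  | 0, _, _, result => ((result.length : Int), result)
  | fuel + 1, n, i, result =>
    if n > 0 then
      if n - i ≥ 0 then
        santaLoopA fuel (n - i) (i + 1) (result ++ [i])
      else
        let result' := pvAddLast result n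
        ((result'.length : Int), result')
    else ((result.length : Int), result)

def santa_claus_and_candies (n : Int) : Int × List Int :=
  santaLoopA (n.toNat + 1) n 1 []

-- ===== PORT B =====
-- while hi - lo > 1: … ; fuel = (hi - lo).toNat bounds the iteration count (the gap shrinks every pass)
def santaBS : Nat → Int → Int → Int → Int
  | 0, lo, _, _ => lo
  | fuel + 1, lo, hi, n =>
    if hi - lo > 1 then
      let mid := PySem.Int.floordiv (lo + hi) 2
      if PySem.Int.floordiv (mid * (mid + 1)) 2 ≤ n then
        santaBS fuel mid hi n
      else
        santaBS fuel lo mid n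
    else lo

def santa_claus_and_candies_alt (n : Int) : Int × List Int :=
  if n ≤ 0 then (0, [])
  else
    let k := santaBS (n + 1 - 0).toNat 0 (n + 1) n
    let result := PySem.List.pyRange 1 (k + 1) 1
    let rem := n - PySem.Int.floordiv (k * (k + 1)) 2
    let result := if rem > 0 then pvAddLast result rem else result
    ((result.length : Int), result)

-- ===== PRECONDITION & SPEC =====
def Spec_santa_claus_and_candies (n : Int) (out : Int × List Int) : Prop := out = santa_claus_and_candies_alt n
instance (n : Int) (out : Int × List Int) : Decidable (Spec_santa_claus_and_candies n out) := by unfold Spec_santa_claus_and_candies; infer_instance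

-- ===== CLAIM (what is proved, stated in full; the proofs are below) =====
def Claim_equal_santa_claus_and_candies : Prop := ∀ (n : Int), Dom_santa_claus_and_candies n → Spec_santa_claus_and_candies n (santa_claus_and_candies n)

-- ===== LEMMAS AND PROOFS =====

-- the k-th triangular number, written exactly as both ports compute it
def pvT (k : Int) : Int := PySem.Int.floordiv (k * (k + 1)) 2

theorem pvT_two_mul (k : Int) : 2 * pvT k = k * (k + 1) := by
  unfold pvT
  rw [PySem.Int.floordiv_eq_ediv_of_pos (by norm_num)]
  rcases Int.even_mul_succ_self k with ⟨m, hm⟩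
  omega

theorem pvT_mono {a b : Int} (h0 : 0 ≤ a) (hab : a ≤ b) : pvT a ≤ pvT b := by
  have ha := pvT_two_mul a
  have hb := pvT_two_mul b
  nlinarith

theorem pvT_unique {a b n : Int} (ha0 : 0 ≤ a) (hb0 : 0 ≤ b)
    (ha : pvT a ≤ n) (ha' : n < pvT (a + 1))
    (hb : pvT b ≤ n) (hb' : n < pvT (b + 1)) : a = b := by
  by_contra hne
  rcases lt_or_gt_of_ne hne with h | h
  · have := pvT_mono (by omega : (0:Int) ≤ a + 1) (by omega : a + 1 ≤ b); omega
  · have := pvT_mono (by omega : (0:Int) ≤ b + 1) (by omega : b + 1 ≤ a); omega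

theorem santaBS_correct (fuel : Nat) : ∀ (lo hi n : Int), 0 ≤ lo → lo < hi →
    pvT lo ≤ n → n < pvT hi → (hi - lo).toNat ≤ fuel + 1 →
    0 ≤ santaBS fuel lo hi n ∧ pvT (santaBS fuel lo hi n) ≤ n ∧ n < pvT (santaBS fuel lo hi n + 1) := by
  induction fuel with
  | zero =>
    intro lo hi n h0 hlt hT hT' hf
    have : hi = lo + 1 := by omega
    subst this
    simp only [santaBS]
    exact ⟨h0, hT, hT'⟩
  | succ fuel ih =>
    intro lo hi n h0 hlt hT hT' hf
    by_cases hgap : hi - lo > 1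
    · have hmid : 2 * PySem.Int.floordiv (lo + hi) 2 ≤ lo + hi ∧
          lo + hi < 2 * PySem.Int.floordiv (lo + hi) 2 + 2 := by
        rw [PySem.Int.floordiv_eq_ediv_of_pos (by norm_num)]
        omega
      have hred : santaBS (fuel + 1) lo hi n =
          if PySem.Int.floordiv (PySem.Int.floordiv (lo + hi) 2 * (PySem.Int.floordiv (lo + hi) 2 + 1)) 2 ≤ n
          then santaBS fuel (PySem.Int.floordiv (lo + hi) 2) hi n
          else santaBS fuel lo (PySem.Int.floordiv (lo + hi) 2) n := by
        simp only [santaBS]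
        rw [if_pos hgap]
      set mid := PySem.Int.floordiv (lo + hi) 2 with hm
      have hlo : lo < mid := by omega
      have hhi : mid < hi := by omega
      rw [hred]
      by_cases hc : PySem.Int.floordiv (mid * (mid + 1)) 2 ≤ n
      · rw [if_pos hc]
        exact ih mid hi n (by omega) hhi hc hT' (by omega)
      · rw [if_neg hc]
        exact ih lo mid n h0 hlo hT (by unfold pvT; omega) (by omega)
    · have : hi = lo + 1 := by omega
      subst this
      simp only [santaBS]
      rw [if_neg hgap]
      exact ⟨h0, hT, hT'⟩

-- the binary search in B returns the unique k with pvT k ≤ n < pvT (k+1)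
theorem santaBS_eq (n k : Int) (hn : 0 < n) (hk0 : 0 ≤ k)
    (hk : pvT k ≤ n) (hk' : n < pvT (k + 1)) :
    santaBS (n + 1 - 0).toNat 0 (n + 1) n = k := by
  have hT0 : pvT 0 ≤ n := by
    have := pvT_two_mul 0; unfold pvT at *; omega
  have hTn : n < pvT (n + 1) := by
    have := pvT_two_mul (n + 1); nlinarith
  have := santaBS_correct (n + 1 - 0).toNat 0 (n + 1) n le_rfl (by omega) hT0 hTn (by omega)
  exact pvT_unique this.1 hk0 this.2.1 this.2.2 hk hk'

theorem pvT_succ (i : Int) : pvT i = pvT (i - 1) + i := by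
  have h1 := pvT_two_mul i
  have h2 := pvT_two_mul (i - 1)
  nlinarith

theorem alt_unfold (N : Int) (hN : 0 < N) :
    santa_claus_and_candies_alt N =
      (let k := santaBS (N + 1 - 0).toNat 0 (N + 1) N
       let result := PySem.List.pyRange 1 (k + 1) 1
       let rem := N - pvT k
       let result := if rem > 0 then pvAddLast result rem else result
       ((result.length : Int), result)) := by
  unfold santa_claus_and_candies_alt pvT
  rw [if_neg (by omega)]

-- main invariant: from state (n, i, range(1, i)) with n > 0 the loop computes B's answer on pvT (i-1) + n
theorem loopA_eq (fuel : Nat) : ∀ (n i : Int), 0 < n → 1 ≤ i → n.toNat < fuel + 1 →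
    santaLoopA fuel n i (PySem.List.pyRange 1 i 1) =
      santa_claus_and_candies_alt (pvT (i - 1) + n) := by
  induction fuel with
  | zero => intro n i hn _ hf; omega
  | succ fuel ih =>
    intro n i hn hi hf
    set N := pvT (i - 1) + n with hN
    have hTi : pvT i = pvT (i - 1) + i := pvT_succ i
    have hT0 : (0:Int) ≤ pvT (i - 1) := by
      have := pvT_two_mul (i - 1); nlinarith
    have hNpos : 0 < N := by omega
    by_cases hbr : n - i ≥ 0
    · -- loop continues: append i
      have hstep : santaLoopA (fuel + 1) n i (PySem.List.pyRange 1 i 1) =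
          santaLoopA fuel (n - i) (i + 1) (PySem.List.pyRange 1 i 1 ++ [i]) := by
        simp only [santaLoopA]
        rw [if_pos hn, if_pos hbr]
      rw [hstep, ← PySem.List.pyRange_one_succ_right (by omega)]
      by_cases hz : n - i = 0
      · -- n = i: next pass exits with n' = 0, result = range(1, i+1)
        have hend : santaLoopA fuel (n - i) (i + 1) (PySem.List.pyRange 1 (i + 1) 1) =
            (((PySem.List.pyRange 1 (i + 1) 1).length : Int), PySem.List.pyRange 1 (i + 1) 1) := by
          cases fuel with
          | zero => rfl
          | succ f =>
            simp only [santaLoopA]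
            rw [if_neg (by omega)]
        rw [hend, alt_unfold N hNpos]
        have hkk : santaBS (N + 1 - 0).toNat 0 (N + 1) N = i := by
          refine santaBS_eq N i hNpos (by omega) (by omega) ?_
          have h1 : pvT (i + 1) = pvT (i + 1 - 1) + (i + 1) := pvT_succ (i + 1)
          have h2 : pvT (i + 1 - 1) = pvT i := by norm_num
          omega
        simp only [hkk]
        have hrem : N - pvT i = 0 := by omega
        rw [hrem]
        norm_num
      · -- n > i: recurse; pvT i + (n - i) = N
        have h' := ih (n - i) (i + 1) (by omega) (by omega) (by omega)
        have harg : pvT (i + 1 - 1) + (n - i) = N := by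
          have h2 : pvT (i + 1 - 1) = pvT i := by norm_num
          omega
        rw [harg] at h'
        exact h'
    · -- break: result[-1] += n; here i ≥ 2 since 0 < n < i
      have hstep : santaLoopA (fuel + 1) n i (PySem.List.pyRange 1 i 1) =
          (((pvAddLast (PySem.List.pyRange 1 i 1) n).length : Int),
            pvAddLast (PySem.List.pyRange 1 i 1) n) := by
        simp only [santaLoopA]
        rw [if_pos hn, if_neg hbr]
      rw [hstep, alt_unfold N hNpos]
      have hkk : santaBS (N + 1 - 0).toNat 0 (N + 1) N = i - 1 := by
        refine santaBS_eq N (i - 1) hNpos (by omega) (by omega) ?_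
        have h2 : pvT (i - 1 + 1) = pvT i := by norm_num
        omega
      simp only [hkk]
      have hrem : N - pvT (i - 1) = n := by omega
      rw [hrem, if_pos hn]
      have h3 : i - 1 + 1 = i := by omega
      rw [h3]

-- ===== VERDICT (by name: the statement is the Claim_ definition above) =====
theorem santa_claus_and_candies_spec : Claim_equal_santa_claus_and_candies := by
  intro n _
  unfold Spec_santa_claus_and_candies santa_claus_and_candies
  by_cases hn : 0 < n
  · have h := loopA_eq (n.toNat + 1) n 1 hn le_rfl (by omega)
    have hr : PySem.List.pyRange 1 1 1 = [] := PySem.List.pyRange_one_eq_nil le_rfl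
    rw [hr] at h
    have h0 : pvT (1 - 1) + n = n := by
      have h1 : pvT (1 - 1) = pvT 0 := by norm_num
      have h2 := pvT_two_mul 0
      omega
    rw [h0] at h
    exact h
  · have h1 : santaLoopA (n.toNat + 1) n 1 [] = (0, []) := by
      have h2 : n.toNat = 0 := by omega
      rw [h2]
      simp only [santaLoopA]
      rw [if_neg (by omega)]
      simp
    rw [h1]
    unfold santa_claus_and_candies_alt
    rw [if_pos (by omega)]
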